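-- pv_equiv track=rewrite | github.com/wedkarz02/krypto_ug | stegano/stegano.py | hide_message_in_double_spaces
-- ===== SOURCE A (Python) =====
-- def hide_message_in_double_spaces(content, bits):
--     modified_content = []
--     bit_index = 0
--
--     i = 0
--     while i < len(content):
--         if content[i] == ' ' and (i + 1 >= len(content) or content[i + 1] != ' '):
--             if bit_index < len(bits):
--                 modified_content.append(' ' * (1 + int(bits[bit_index])))
--                 bit_index += 1
--             else:
--                 modified_content.append(' ')
--             i += 1
--         else:
--             modified_content.append(content[i])
--             i += 1
--
--     if bit_index < len(bits):
--         raise ValueError("Not enough spaces in destination data")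
--
--     return ''.join(modified_content)
-- ===== SOURCE B (Python) =====
-- def hide_message_in_double_spaces(content, bits):
--     # split/join decomposition: split at every space; the gap before parts[j] carries an
--     # eligible single space iff parts[j] != '' (next char is not a space) or j is the last gap
--     parts = content.split(' ')
--     last = len(parts) - 1
--     if sum(1 for j in range(1, last + 1) if parts[j] != '' or j == last) < len(bits):
--         raise ValueError("Not enough spaces in destination data")
--     pieces = [parts[0]]
--     k = 0
--     for j in range(1, last + 1):
--         if (parts[j] != '' or j == last) and k < len(bits):
--             pieces.append(' ' * (1 + int(bits[k])))
--             k += 1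
--         else:
--             pieces.append(' ')
--         pieces.append(parts[j])
--     return ''.join(pieces)
-- ===== Notes on version B (the rewrite author's own statement) =====
-- stated objective: alternative
-- what changed: Replaces A's index-based character walk with lookahead by a split/join algorithm: split the string at every space with str.split(' '), decide eligibility of each gap from the emptiness of the following part (empty part = space followed by space) instead of looking at characters, then join parts with per-gap separators of 1+bit spaces.
import Mathlib
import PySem

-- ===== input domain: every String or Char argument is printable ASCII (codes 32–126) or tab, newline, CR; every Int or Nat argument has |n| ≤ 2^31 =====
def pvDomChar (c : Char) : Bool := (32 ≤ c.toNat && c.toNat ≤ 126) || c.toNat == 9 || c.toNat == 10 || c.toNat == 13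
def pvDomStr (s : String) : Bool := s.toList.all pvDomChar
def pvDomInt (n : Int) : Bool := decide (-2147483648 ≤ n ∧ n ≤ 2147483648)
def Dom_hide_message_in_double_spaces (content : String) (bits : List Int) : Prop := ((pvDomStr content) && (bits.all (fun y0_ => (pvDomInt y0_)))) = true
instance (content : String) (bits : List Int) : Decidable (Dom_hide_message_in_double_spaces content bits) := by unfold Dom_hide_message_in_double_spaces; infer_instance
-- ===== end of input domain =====

-- B replaces A's index-based character walk by a split/join algorithm (split on ' ', decide
-- eligibility of each gap from the emptiness of the following part, re-join with per-gap
-- separators of 1+bit spaces); objective: alternative, same cost.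


-- ' ' * (1 + b): Python string repetition, empty for a non-positive count (Int.toNat clamps, exactly Python)
def pySpaces (b : Int) : String := String.ofList (List.replicate (1 + b).toNat ' ')

-- A's lookahead `i + 1 >= len(content) or content[i+1] != ' '` on the remaining characters
def nextOk : List Char → Bool
  | [] => true
  | d :: _ => d != ' '

-- ===== PORT A =====
-- A's while loop over index i (i advances by 1 each iteration): structural recursion over the remaining
-- characters; `rest` is content[i+1:], so `nextOk rest` is A's lookahead condition.
-- A's final `raise` (when bit_index < len(bits)) is excluded by Pre_; the port returns the join.
def hideLoopA (bits : List Int) : List Char → Nat → List String → List String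
  | [], _, acc => acc.reverse
  | c :: rest, bitIndex, acc =>
    if c = ' ' ∧ nextOk rest = true then
      if bitIndex < bits.length then
        hideLoopA bits rest (bitIndex + 1) (pySpaces (bits.getD bitIndex 0) :: acc)
      else
        hideLoopA bits rest bitIndex (" " :: acc)
    else
      hideLoopA bits rest bitIndex (String.ofList [c] :: acc)

def hide_message_in_double_spaces (content : String) (bits : List Int) : String :=
  String.join (hideLoopA bits content.toList 0 [])

-- ===== PORT B =====
-- content.split(' '): hand port of Python str.split with the one-character separator ' '
-- (exact: an empty string gives [''], k consecutive spaces give k-1 empty parts between)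
def splitSp : List Char → List (List Char)
  | [] => [[]]
  | c :: r =>
    if c = ' ' then [] :: splitSp r
    else match splitSp r with
         | p :: ps => (c :: p) :: ps
         | [] => [[c]]   -- unreachable: splitSp never returns []

-- the `for j in range(1, last+1)` loop over parts[1:]; `ps = []` is `j == last`, k counts bits used
def emitB (bits : List Int) : List (List Char) → Nat → List String
  | [], _ => []
  | p :: ps, k =>
    if (p ≠ [] ∨ ps = []) ∧ k < bits.length then
      pySpaces (bits.getD k 0) :: String.ofList p :: emitB bits ps (k + 1)
    else
      " " :: String.ofList p :: emitB bits ps k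

-- B's up-front `raise` fires exactly when Pre_ fails (same count as A); the port returns the join.
def hide_message_in_double_spaces_alt (content : String) (bits : List Int) : String :=
  let parts := splitSp content.toList
  String.join (String.ofList (parts.headD []) :: emitB bits parts.tail 0)

-- ===== PRECONDITION & SPEC =====
-- count of eligible positions: spaces not followed by another space
def eligCount : List Char → Nat
  | [] => 0
  | [c] => if c = ' ' then 1 else 0
  | c :: d :: rest => (if c = ' ' ∧ d ≠ ' ' then 1 else 0) + eligCount (d :: rest)

-- Pre_ excludes exactly the inputs on which A raises ValueError: fewer eligible single spaces than bits.
def Pre_hide_message_in_double_spaces (content : String) (bits : List Int) : Prop :=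
  bits.length ≤ eligCount content.toList
instance (content : String) (bits : List Int) : Decidable (Pre_hide_message_in_double_spaces content bits) := by unfold Pre_hide_message_in_double_spaces; infer_instance

def pvWitness_hide_message_in_double_spaces : String × List Int := ("ab cd e ", [1, 0])

def Spec_hide_message_in_double_spaces (content : String) (bits : List Int) (out : String) : Prop := out = hide_message_in_double_spaces_alt content bits
instance (content : String) (bits : List Int) (out : String) : Decidable (Spec_hide_message_in_double_spaces content bits out) := by unfold Spec_hide_message_in_double_spaces; infer_instance

-- ===== CLAIM =====
def Claim_equal_hide_message_in_double_spaces : Prop := ∀ (content : String) (bits : List Int), Dom_hide_message_in_double_spaces content bits → Pre_hide_message_in_double_spaces content bits → Spec_hide_message_in_double_spaces content bits (hide_message_in_double_spaces content bits)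

-- ===== LEMMAS AND PROOFS =====
-- A's loop, accumulator discharged, bits consumed as a list
def runA : List Char → List Int → List String
  | [], _ => []
  | c :: rest, bs =>
    if c = ' ' ∧ nextOk rest = true then
      match bs with
      | b :: bs' => pySpaces b :: runA rest bs'
      | [] => " " :: runA rest []
    else String.ofList [c] :: runA rest bs

theorem hideLoopA_eq (bits : List Int) :
    ∀ (cs : List Char) (k : Nat) (acc : List String),
      hideLoopA bits cs k acc = acc.reverse ++ runA cs (bits.drop k) := by
  intro cs
  induction cs with
  | nil => intro k acc; simp [hideLoopA, runA]
  | cons c rest ih =>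
    intro k acc
    by_cases hk : k < bits.length
    · have hdrop : List.drop k bits = bits[k] :: List.drop (k + 1) bits :=
        List.drop_eq_getElem_cons hk
      have hgetD : bits.getD k 0 = bits[k] := by
        simp [List.getD_eq_getElem?_getD, List.getElem?_eq_getElem hk]
      simp only [hideLoopA, if_pos hk, ih, hdrop, runA, hgetD]
      split_ifs <;> simp_all
    · have hdrop : List.drop k bits = [] := by
        rw [List.drop_eq_nil_iff]; omega
      simp only [hideLoopA, if_neg hk, ih, hdrop, runA]
      split_ifs <;> simp_all

-- B's counter-based loop, bits consumed as a list
def emitGaps : List Int → List (List Char) → List String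
  | _, [] => []
  | bs, p :: ps =>
    if p ≠ [] ∨ ps = [] then
      match bs with
      | b :: bs' => pySpaces b :: String.ofList p :: emitGaps bs' ps
      | [] => " " :: String.ofList p :: emitGaps [] ps
    else " " :: String.ofList p :: emitGaps bs ps

theorem emitB_eq (bits : List Int) :
    ∀ (ps : List (List Char)) (k : Nat), emitB bits ps k = emitGaps (bits.drop k) ps := by
  intro ps
  induction ps with
  | nil => intro k; simp [emitB, emitGaps]
  | cons p rest ih =>
    intro k
    by_cases he : p ≠ [] ∨ rest = []
    · by_cases hk : k < bits.length
      · have hdrop : List.drop k bits = bits[k] :: List.drop (k + 1) bits :=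
          List.drop_eq_getElem_cons hk
        have hgetD : bits.getD k 0 = bits[k] := by
          simp [List.getD_eq_getElem?_getD, List.getElem?_eq_getElem hk]
        simp only [emitB]
        rw [if_pos ⟨he, hk⟩, hgetD, ih, hdrop]
        simp only [emitGaps]
        rw [if_pos he]
      · have hdrop : List.drop k bits = [] := by
          rw [List.drop_eq_nil_iff]; omega
        simp only [emitB]
        rw [if_neg (fun h => hk h.2), ih, hdrop]
        simp only [emitGaps]
        rw [if_pos he]
    · simp only [emitB]
      rw [if_neg (fun h => he h.1), ih]
      simp only [emitGaps]
      rw [if_neg he]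

theorem splitSp_ne_nil (cs : List Char) : splitSp cs ≠ [] := by
  cases cs with
  | nil => simp [splitSp]
  | cons c r =>
    simp only [splitSp]
    split_ifs
    · simp
    · cases h : splitSp r <;> simp

theorem splitSp_space (r : List Char) : splitSp (' ' :: r) = [] :: splitSp r := by
  simp [splitSp]

theorem splitSp_ne {c : Char} {r : List Char} {p : List Char} {ps : List (List Char)}
    (hc : c ≠ ' ') (h : splitSp r = p :: ps) : splitSp (c :: r) = (c :: p) :: ps := by
  simp only [splitSp, if_neg hc, h]

def strsChars (l : List String) : List Char := (l.map String.toList).flatten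

-- eligibility of the first gap read off the split of the rest: the part after the space is
-- nonempty (next char not a space) or it is the last part (end of string / no further space)
theorem elig_iff {rest : List Char} {p : List Char} {ps : List (List Char)}
    (hsp : splitSp rest = p :: ps) : (p ≠ [] ∨ ps = []) ↔ nextOk rest = true := by
  cases rest with
  | nil =>
    simp only [splitSp] at hsp
    obtain ⟨h1, h2⟩ := List.cons_eq_cons.mp hsp
    simp [← h2, nextOk]
  | cons d r =>
    by_cases hd : d = ' '
    · subst hd
      rw [splitSp_space] at hsp
      obtain ⟨h1, h2⟩ := List.cons_eq_cons.mp hsp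
      subst h1; subst h2
      have := splitSp_ne_nil r
      simp [nextOk, this]
    · obtain ⟨q, qs, hq⟩ : ∃ q qs, splitSp r = q :: qs := by
        cases h : splitSp r with
        | nil => exact absurd h (splitSp_ne_nil r)
        | cons q qs => exact ⟨q, qs, rfl⟩
      rw [splitSp_ne hd hq] at hsp
      obtain ⟨h1, h2⟩ := List.cons_eq_cons.mp hsp
      subst h2
      simp [nextOk, hd, ← h1]

theorem runA_chars (cs : List Char) :
    ∀ bs, strsChars (runA cs bs)
      = (splitSp cs).headD [] ++ strsChars (emitGaps bs (splitSp cs).tail) := by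
  induction cs with
  | nil => intro bs; simp [runA, splitSp, emitGaps, strsChars]
  | cons c rest ih =>
    intro bs
    obtain ⟨p, ps, hsp⟩ : ∃ p ps, splitSp rest = p :: ps := by
      cases h : splitSp rest with
      | nil => exact absurd h (splitSp_ne_nil rest)
      | cons p ps => exact ⟨p, ps, rfl⟩
    by_cases hc : c = ' '
    · subst hc
      rw [splitSp_space, List.headD_cons, List.tail_cons, hsp]
      by_cases he : p ≠ [] ∨ ps = []
      · have hok : nextOk rest = true := (elig_iff hsp).mp he
        cases bs with
        | nil =>
          simp only [runA, emitGaps]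
          rw [if_pos (And.intro trivial hok), if_pos he]
          simp [strsChars] at ih ⊢
          rw [ih, hsp]; simp
        | cons b bs' =>
          simp only [runA, emitGaps]
          rw [if_pos (And.intro trivial hok), if_pos he]
          simp [strsChars] at ih ⊢
          rw [ih, hsp]; simp
      · simp only [runA, emitGaps]
        rw [if_neg (fun h => he ((elig_iff hsp).mpr h.2)), if_neg he]
        simp [strsChars] at ih ⊢
        rw [ih, hsp]; simp
    · rw [splitSp_ne hc hsp, List.headD_cons, List.tail_cons]
      simp only [runA]
      rw [if_neg (fun h => hc h.1)]
      simp [strsChars] at ih ⊢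
      rw [ih, hsp]; simp

theorem join_chars_aux (l : List String) :
    ∀ a : String, (List.foldl (fun r s => r ++ s) a l).toList
      = a.toList ++ (l.map String.toList).flatten := by
  induction l with
  | nil => intro a; simp
  | cons s rest ih => intro a; simp [ih]

theorem join_chars (l : List String) : (String.join l).toList = strsChars l := by
  simp [String.join, strsChars, join_chars_aux l ""]

-- ===== VERDICT =====
theorem hide_message_in_double_spaces_spec : Claim_equal_hide_message_in_double_spaces := by
  intro content bits _ _
  show _ = _
  unfold hide_message_in_double_spaces hide_message_in_double_spaces_alt
  apply String.toList_injective
  rw [hideLoopA_eq]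
  simp only [List.reverse_nil, List.nil_append, List.drop_zero]
  rw [join_chars, join_chars, runA_chars]
  simp [strsChars, emitB_eq]
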